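-- pv_equiv track=rewrite | github.com/Predragon/the-third-voice | modules/utils.py | get_message_stats
-- ===== SOURCE A (Python) =====
-- from typing import Dict, Any, Optional
--
-- def get_message_stats(history: list) -> Dict[str, int]:
--     """
--     Calculate statistics for message history
--
--     Args:
--         history: List of history entries
--
--     Returns:
--         Dictionary with message statistics
--     """
--     if not history:
--         return {'total': 0, 'coached': 0, 'translated': 0}
--
--     coached = sum(1 for entry in history if entry.get('type') == 'coach')
--     translated = sum(1 for entry in history if entry.get('type') == 'translate')
--
--     return {
--         'total': len(history),
--         'coached': coached,
--         'translated': translated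
--     }
-- ===== SOURCE B (Python) =====
-- def get_message_stats(history: list):
--     # Single explicit loop maintaining all three counters at once (no len(),
--     # no empty-history special case, no staged generator sums).
--     total = coached = translated = 0
--     for entry in history:
--         total += 1
--         t = entry.get('type')
--         if t == 'coach':
--             coached += 1
--         elif t == 'translate':
--             translated += 1
--     return {'total': total, 'coached': coached, 'translated': translated}
-- ===== Notes on version B (the rewrite author's own statement) =====
-- stated objective: simpler
-- what changed: Replaces the empty-history guard, the len() call and the two staged filtered generator sums with one explicit loop carrying a (total, coached, translated) accumulator updated per entry.
import Mathlib
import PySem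

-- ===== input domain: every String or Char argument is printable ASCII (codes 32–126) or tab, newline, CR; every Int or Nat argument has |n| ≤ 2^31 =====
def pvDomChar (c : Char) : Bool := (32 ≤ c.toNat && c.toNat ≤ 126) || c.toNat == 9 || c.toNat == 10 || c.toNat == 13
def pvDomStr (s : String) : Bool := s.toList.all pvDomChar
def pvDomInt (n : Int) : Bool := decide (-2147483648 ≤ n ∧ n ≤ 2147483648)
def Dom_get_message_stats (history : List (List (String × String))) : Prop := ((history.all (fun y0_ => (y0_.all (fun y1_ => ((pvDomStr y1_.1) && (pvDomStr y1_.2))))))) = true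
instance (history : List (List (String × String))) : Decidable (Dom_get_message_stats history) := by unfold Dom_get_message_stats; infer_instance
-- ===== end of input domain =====

-- B replaces the empty-history guard, len() and the two staged filtered sums with one explicit loop carrying a (total, coached, translated) accumulator (simpler; same cost).


-- ===== PORT A =====
def get_message_stats (history : List (List (String × String))) : List (String × Int) :=
  if history = [] then [("total", 0), ("coached", 0), ("translated", 0)]
  else
    let coached := history.foldl
      (fun acc e => if (PySem.Dict.mk e).get? "type" = some "coach" then acc + 1 else acc) (0 : Int)
    let translated := history.foldl
      (fun acc e => if (PySem.Dict.mk e).get? "type" = some "translate" then acc + 1 else acc) (0 : Int)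
    [("total", (history.length : Int)), ("coached", coached), ("translated", translated)]

-- ===== PORT B =====
def get_message_stats_alt (history : List (List (String × String))) : List (String × Int) :=
  let st := history.foldl
    (fun (st : Int × Int × Int) e =>
      let t := (PySem.Dict.mk e).get? "type"
      (st.1 + 1,
       (if t = some "coach" then st.2.1 + 1 else st.2.1),
       (if t = some "coach" then st.2.2
        else if t = some "translate" then st.2.2 + 1 else st.2.2)))
    ((0 : Int), (0 : Int), (0 : Int))
  [("total", st.1), ("coached", st.2.1), ("translated", st.2.2)]

-- ===== PRECONDITION & SPEC =====
def Spec_get_message_stats (history : List (List (String × String))) (out : List (String × Int)) : Prop := out = get_message_stats_alt history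
instance (history : List (List (String × String))) (out : List (String × Int)) : Decidable (Spec_get_message_stats history out) := by unfold Spec_get_message_stats; infer_instance

-- ===== CLAIM (what is proved, stated in full; the proofs are below) =====
def Claim_equal_get_message_stats : Prop := ∀ (history : List (List (String × String))), Dom_get_message_stats history → Spec_get_message_stats history (get_message_stats history)

-- ===== LEMMAS AND PROOFS =====
lemma fold_triple (history : List (List (String × String))) (a b c : Int) :
    history.foldl
      (fun (st : Int × Int × Int) e =>
        let t := (PySem.Dict.mk e).get? "type"
        (st.1 + 1,
         (if t = some "coach" then st.2.1 + 1 else st.2.1),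
         (if t = some "coach" then st.2.2
          else if t = some "translate" then st.2.2 + 1 else st.2.2)))
      (a, b, c)
    = (a + (history.length : Int),
       history.foldl (fun acc e => if (PySem.Dict.mk e).get? "type" = some "coach" then acc + 1 else acc) b,
       history.foldl (fun acc e => if (PySem.Dict.mk e).get? "type" = some "translate" then acc + 1 else acc) c) := by
  induction history generalizing a b c with
  | nil => simp
  | cons h t ih =>
    simp only [List.foldl_cons, List.length_cons, ih]
    split_ifs with h1 h2 <;> simp_all <;> ring

-- ===== VERDICT (by name: the statement is the Claim_ definition above) =====
theorem get_message_stats_spec : Claim_equal_get_message_stats := by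
  intro history _
  unfold Spec_get_message_stats get_message_stats get_message_stats_alt
  by_cases h : history = [] <;> simp [h, fold_triple]
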